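-- pv_equiv track=rewrite | github.com/Citizen-T/aim-to-md | src/aim_parser.py | _find_span_end
-- ===== SOURCE A (Python) =====
-- def _find_span_end(content: str) -> int:
--     """Find the end of a SPAN message, handling nested SPANs"""
--     span_count = 1
--     i = 0
--
--     while i < len(content) and span_count > 0:
--         if content[i:i+5] == '<SPAN':
--             span_count += 1
--             # Skip to end of tag
--             tag_end = content.find('>', i)
--             i = tag_end + 1 if tag_end != -1 else i + 1
--         elif content[i:i+7] == '</SPAN>':
--             span_count -= 1
--             if span_count == 0:
--                 return i
--             i += 7
--         else:
--             i += 1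
--
--     return -1 if span_count > 0 else i
-- ===== SOURCE B (Python) =====
-- def _find_span_end(content: str) -> int:
--     """Find the end of a SPAN message, handling nested SPANs"""
--     span_count = 1
--     i = 0
--     while True:
--         a = content.find('<SPAN', i)
--         b = content.find('</SPAN>', i)
--         if b == -1:
--             return -1
--         if a != -1 and a < b:
--             span_count += 1
--             g = content.find('>', a)
--             i = g + 1 if g != -1 else a + 1
--         else:
--             span_count -= 1
--             if span_count == 0:
--                 return b
--             i = b + 7
-- ===== Notes on version B (the rewrite author's own statement) =====
-- stated objective: faster
-- what changed: Replaces the per-character scan that tests a 5- and 7-char slice at every index with a loop that jumps directly between occurrences of '<SPAN' and '</SPAN>' found by str.find, processing whichever comes first.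
import Mathlib
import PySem

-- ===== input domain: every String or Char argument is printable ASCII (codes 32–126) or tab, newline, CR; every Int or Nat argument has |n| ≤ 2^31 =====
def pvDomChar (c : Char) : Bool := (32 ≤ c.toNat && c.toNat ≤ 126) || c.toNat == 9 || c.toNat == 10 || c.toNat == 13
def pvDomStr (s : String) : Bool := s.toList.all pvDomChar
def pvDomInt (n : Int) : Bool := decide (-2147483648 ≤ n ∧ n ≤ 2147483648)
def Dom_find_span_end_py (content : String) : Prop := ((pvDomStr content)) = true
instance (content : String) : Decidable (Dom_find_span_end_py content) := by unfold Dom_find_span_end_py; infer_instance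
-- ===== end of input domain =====

-- B replaces A's per-character slice tests with str.find jumps between '<SPAN'/'</SPAN>' occurrences (same return value; constant-factor mechanism, measured).

-- ===== PORT A =====
-- the while loop of A, state (span_count, i); i grows strictly at every step
def find_span_end_go (cs : List Char) (count : Int) (i : Nat) : Int :=
  if h : i < cs.length ∧ 0 < count then
    if PySem.List.slice cs (some (i:Int)) (some ((i:Int)+5)) = "<SPAN".toList then
      -- tag_end = content.find('>', i), inlined; i = tag_end + 1 if tag_end != -1 else i + 1
      find_span_end_go cs (count+1)
        (if PySem.Chars.findFrom cs ['>'] (i:Int) none ≠ -1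
         then (PySem.Chars.findFrom cs ['>'] (i:Int) none).toNat + 1 else i+1)
    else if PySem.List.slice cs (some (i:Int)) (some ((i:Int)+7)) = "</SPAN>".toList then
      if count - 1 = 0 then (i:Int) else find_span_end_go cs (count-1) (i+7)
    else
      find_span_end_go cs count (i+1)
  else
    if 0 < count then -1 else (i:Int)
termination_by cs.length - i
decreasing_by
  · split_ifs with hne
    · have hk : (i:Int) ≤ PySem.Chars.findFrom cs ['>'] (i:Int) none :=
        (PySem.Chars.findFrom_natCast_spec cs ['>'] i (le_of_lt h.1) hne).1
      omega
    · omega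
  · omega
  · omega

def find_span_end_py (content : String) : Int :=
  find_span_end_go content.toList 1 0

-- ===== PORT B =====
-- the while-True loop of B; fuel only makes the recursion structural (length+1 always suffices: i strictly grows and stays ≤ length while the loop continues)
def find_span_end_alt_go (cs : List Char) (fuel : Nat) (count : Int) (i : Nat) : Int :=
  match fuel with
  | 0 => -1
  | fuel+1 =>
    let a := PySem.Chars.findFrom cs "<SPAN".toList (i:Int) none
    let b := PySem.Chars.findFrom cs "</SPAN>".toList (i:Int) none
    if b = -1 then -1
    else if a ≠ -1 ∧ a < b then
      let g := PySem.Chars.findFrom cs ['>'] a none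
      find_span_end_alt_go cs fuel (count+1) (if g ≠ -1 then g.toNat + 1 else a.toNat + 1)
    else
      if count - 1 = 0 then b else find_span_end_alt_go cs fuel (count-1) (b.toNat + 7)

def find_span_end_py_alt (content : String) : Int :=
  find_span_end_alt_go content.toList (content.toList.length + 1) 1 0

-- ===== PRECONDITION & SPEC =====
def Spec_find_span_end_py (content : String) (out : Int) : Prop := out = find_span_end_py_alt content
instance (content : String) (out : Int) : Decidable (Spec_find_span_end_py content out) := by unfold Spec_find_span_end_py; infer_instance

-- ===== CLAIM (what is proved, stated in full; the proofs are below) =====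
def Claim_equal_find_span_end_py : Prop := ∀ (content : String), Dom_find_span_end_py content → Spec_find_span_end_py content (find_span_end_py content)

-- ===== LEMMAS AND PROOFS =====

-- '<SPAN' starts at position i / '</SPAN>' starts at position i
def openAt (cs : List Char) (i : Nat) : Prop := "<SPAN".toList <+: cs.drop i
def closeAt (cs : List Char) (i : Nat) : Prop := "</SPAN>".toList <+: cs.drop i

theorem slice5_eq (cs : List Char) (i : Nat) :
    (PySem.List.slice cs (some (i:Int)) (some ((i:Int)+5)) = "<SPAN".toList) ↔ openAt cs i := by
  unfold openAt
  have h5 : ((i:Int)+5) = (i:Int) + ((5:Nat):Int) := by norm_num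
  rw [h5, PySem.List.slice_natCast_add, List.prefix_iff_eq_take,
      show ("<SPAN".toList).length = 5 from rfl]
  exact ⟨fun h => h.symm, fun h => h.symm⟩

theorem slice7_eq (cs : List Char) (i : Nat) :
    (PySem.List.slice cs (some (i:Int)) (some ((i:Int)+7)) = "</SPAN>".toList) ↔ closeAt cs i := by
  unfold closeAt
  have h7 : ((i:Int)+7) = (i:Int) + ((7:Nat):Int) := by norm_num
  rw [h7, PySem.List.slice_natCast_add, List.prefix_iff_eq_take,
      show ("</SPAN>".toList).length = 7 from rfl]
  exact ⟨fun h => h.symm, fun h => h.symm⟩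

-- a nonempty prefix of cs.drop j pins j + its length inside cs
theorem prefix_drop_bounds {cs p : List Char} {j : Nat} (hp : p ≠ []) (h : p <+: cs.drop j) :
    j + p.length ≤ cs.length := by
  have h1 := h.length_le
  have h2 : 0 < p.length := List.length_pos_of_ne_nil hp
  simp only [List.length_drop] at h1
  omega

-- an infix of a later drop is an infix of an earlier one
theorem infix_drop_mono {cs p : List Char} {i j : Nat} (hij : i ≤ j)
    (h : p <:+: cs.drop j) : p <:+: cs.drop i := by
  have hd : cs.drop j = (cs.drop i).drop (j - i) := by
    rw [List.drop_drop]; congr 1; omega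
  exact h.trans (hd ▸ (List.drop_suffix (j - i) (cs.drop i)).isInfix)

-- when no '</SPAN>' remains, A scans to the end and returns -1
theorem no_close_neg_one (cs : List Char) :
    ∀ d i c, cs.length - i ≤ d → ¬ ("</SPAN>".toList <:+: cs.drop i) → 0 < c →
    find_span_end_go cs c i = -1 := by
  intro d
  induction d with
  | zero =>
    intro i c hd hno hc
    rw [find_span_end_go, dif_neg (by omega), if_pos hc]
  | succ d IH =>
    intro i c hd hno hc
    by_cases hil : i < cs.length
    · rw [find_span_end_go, dif_pos ⟨hil, hc⟩]
      have hnc : ¬ closeAt cs i := fun h => hno h.isInfix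
      by_cases hop : openAt cs i
      · rw [if_pos ((slice5_eq cs i).mpr hop)]
        by_cases hne : PySem.Chars.findFrom cs ['>'] (i:Int) none = -1
        · rw [if_neg (fun h => h hne)]
          exact IH (i+1) (c+1) (by omega)
            (fun h => hno (infix_drop_mono (by omega) h)) (by omega)
        · have hsp := PySem.Chars.findFrom_natCast_spec cs ['>'] i (le_of_lt hil) hne
          have h1 : (i:Int) ≤ PySem.Chars.findFrom cs ['>'] (i:Int) none := hsp.1
          have h2 := prefix_drop_bounds (by decide) hsp.2.1
          rw [if_pos hne]
          refine IH _ (c+1) (by simp only [List.length_singleton] at h2; omega)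
            (fun h => hno (infix_drop_mono (by omega) h)) (by omega)
      · rw [if_neg (fun h => hop ((slice5_eq cs i).mp h)),
            if_neg (fun h => hnc ((slice7_eq cs i).mp h))]
        exact IH (i+1) c (by omega)
          (fun h => hno (infix_drop_mono (by omega) h)) hc
    · rw [find_span_end_go, dif_neg (fun h => hil h.1), if_pos hc]

-- A just increments i across a stretch with no tag start
theorem skip_lemma (cs : List Char) :
    ∀ d i e c, e - i ≤ d → i ≤ e → e ≤ cs.length → 0 < c →
    (∀ j, i ≤ j → j < e → ¬ openAt cs j ∧ ¬ closeAt cs j) →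
    find_span_end_go cs c i = find_span_end_go cs c e := by
  intro d
  induction d with
  | zero =>
    intro i e c hd hie _ _ _
    have : i = e := by omega
    rw [this]
  | succ d IH =>
    intro i e c hd hie hel hc hno
    rcases Nat.eq_or_lt_of_le hie with he | hlt
    · rw [he]
    · have hilen : i < cs.length := by omega
      have hni := hno i le_rfl hlt
      rw [find_span_end_go, dif_pos ⟨hilen, hc⟩,
          if_neg (fun h => hni.1 ((slice5_eq cs i).mp h)),
          if_neg (fun h => hni.2 ((slice7_eq cs i).mp h))]
      exact IH (i+1) e c (by omega) (by omega) hel hc (fun j hj1 hj2 => hno j (by omega) hj2)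

-- one unfolding of B's loop
theorem altGo_succ (cs : List Char) (f : Nat) (c : Int) (i : Nat) :
    find_span_end_alt_go cs (f+1) c i =
      (if PySem.Chars.findFrom cs "</SPAN>".toList (i:Int) none = -1 then -1
       else if PySem.Chars.findFrom cs "<SPAN".toList (i:Int) none ≠ -1 ∧
               PySem.Chars.findFrom cs "<SPAN".toList (i:Int) none <
               PySem.Chars.findFrom cs "</SPAN>".toList (i:Int) none then
         find_span_end_alt_go cs f (c+1)
           (if PySem.Chars.findFrom cs ['>'] (PySem.Chars.findFrom cs "<SPAN".toList (i:Int) none) none ≠ -1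
            then (PySem.Chars.findFrom cs ['>'] (PySem.Chars.findFrom cs "<SPAN".toList (i:Int) none) none).toNat + 1
            else (PySem.Chars.findFrom cs "<SPAN".toList (i:Int) none).toNat + 1)
       else if c - 1 = 0 then PySem.Chars.findFrom cs "</SPAN>".toList (i:Int) none
       else find_span_end_alt_go cs f (c-1)
         ((PySem.Chars.findFrom cs "</SPAN>".toList (i:Int) none).toNat + 7)) := rfl

theorem main_lemma (cs : List Char) :
    ∀ fuel i c, i ≤ cs.length → cs.length + 1 - i ≤ fuel → 0 < c →
    find_span_end_go cs c i = find_span_end_alt_go cs fuel c i := by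
  intro fuel
  induction fuel with
  | zero => intro i c h1 h2 _; omega
  | succ f IH =>
    intro i c hi hf hc
    rw [altGo_succ]
    by_cases hb : PySem.Chars.findFrom cs "</SPAN>".toList (i:Int) none = -1
    · rw [if_pos hb]
      exact no_close_neg_one cs (cs.length - i) i c le_rfl
        ((PySem.Chars.findFrom_natCast_eq_neg_one_iff cs _ i hi).mp hb) hc
    · rw [if_neg hb]
      have hbsp := PySem.Chars.findFrom_natCast_spec cs "</SPAN>".toList i hi hb
      have hbge : (i:Int) ≤ PySem.Chars.findFrom cs "</SPAN>".toList (i:Int) none := hbsp.1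
      set b := PySem.Chars.findFrom cs "</SPAN>".toList (i:Int) none with hbdef
      have hb7 : b.toNat + 7 ≤ cs.length := by
        have := prefix_drop_bounds (by decide) hbsp.2.1
        simpa using this
      by_cases hab : PySem.Chars.findFrom cs "<SPAN".toList (i:Int) none ≠ -1 ∧
          PySem.Chars.findFrom cs "<SPAN".toList (i:Int) none < b
      · rw [if_pos hab]
        have hasp := PySem.Chars.findFrom_natCast_spec cs "<SPAN".toList i hi hab.1
        have hage : (i:Int) ≤ PySem.Chars.findFrom cs "<SPAN".toList (i:Int) none := hasp.1
        set a := PySem.Chars.findFrom cs "<SPAN".toList (i:Int) none with hadef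
        have ha5 : a.toNat + 5 ≤ cs.length := by
          have := prefix_drop_bounds (by decide) hasp.2.1
          simpa using this
        -- skip from i to the open tag at a.toNat
        have hskip : find_span_end_go cs c i = find_span_end_go cs c a.toNat := by
          refine skip_lemma cs (a.toNat - i) i a.toNat c le_rfl (by omega) (by omega) hc ?_
          intro j hj1 hj2
          exact ⟨hasp.2.2 j hj1 hj2, hbsp.2.2 j hj1 (by omega)⟩
        rw [hskip, find_span_end_go, dif_pos ⟨by omega, hc⟩,
            if_pos ((slice5_eq cs a.toNat).mpr hasp.2.1)]
        have haN : ((a.toNat : Nat) : Int) = a := by omega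
        rw [haN]
        by_cases hg : PySem.Chars.findFrom cs ['>'] a none = -1
        · rw [if_neg (fun h => h hg)]
          exact IH (a.toNat + 1) (c+1) (by omega) (by omega) (by omega)
        · have hgsp := PySem.Chars.findFrom_natCast_spec cs ['>'] a.toNat (by omega)
            (by rw [haN]; exact hg)
          rw [haN] at hgsp
          have hg1 : a ≤ PySem.Chars.findFrom cs ['>'] a none := hgsp.1
          have hg2 : (PySem.Chars.findFrom cs ['>'] a none).toNat + 1 ≤ cs.length := by
            have := prefix_drop_bounds (by decide) hgsp.2.1
            simpa using this
          rw [if_pos hg]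
          exact IH _ (c+1) (by omega) (by omega) (by omega)
      · rw [if_neg hab]
        -- the close at b.toNat is the first tag start after i
        have hnoopen : ∀ j, i ≤ j → j < b.toNat → ¬ openAt cs j := by
          intro j hj1 hj2 hj
          by_cases hA : PySem.Chars.findFrom cs "<SPAN".toList (i:Int) none = -1
          · exact ((PySem.Chars.findFrom_natCast_eq_neg_one_iff cs _ i hi).mp hA)
              (infix_drop_mono hj1 (List.IsPrefix.isInfix hj))
          · have hasp := PySem.Chars.findFrom_natCast_spec cs "<SPAN".toList i hi hA
            have hba : b ≤ PySem.Chars.findFrom cs "<SPAN".toList (i:Int) none := by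
              rcases not_and_or.mp hab with h | h
              · exact absurd hA (by simpa using h)
              · omega
            exact hasp.2.2 j hj1 (by omega) hj
        have hskip : find_span_end_go cs c i = find_span_end_go cs c b.toNat := by
          refine skip_lemma cs (b.toNat - i) i b.toNat c le_rfl (by omega) (by omega) hc ?_
          intro j hj1 hj2
          exact ⟨hnoopen j hj1 hj2, hbsp.2.2 j hj1 hj2⟩
        -- at b.toNat the '<SPAN' test cannot fire ('</SPAN>' starts there)
        have hnotopen : ¬ openAt cs b.toNat := by
          intro hop
          have h1 := hop.getElem (i := 1) (by decide)
          have h2 := hbsp.2.1.getElem (i := 1) (by decide)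
          exact absurd (h2.trans h1.symm) (by decide)
        rw [hskip, find_span_end_go, dif_pos ⟨by omega, hc⟩,
            if_neg (fun h => hnotopen ((slice5_eq cs b.toNat).mp h)),
            if_pos ((slice7_eq cs b.toNat).mpr hbsp.2.1)]
        by_cases hc1 : c - 1 = 0
        · rw [if_pos hc1, if_pos hc1]; omega
        · rw [if_neg hc1, if_neg hc1]
          exact IH (b.toNat + 7) (c-1) (by omega) (by omega) (by omega)

-- ===== VERDICT (by name: the statement is the Claim_ definition above) =====
theorem find_span_end_py_spec : Claim_equal_find_span_end_py := by
  intro content _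
  unfold Spec_find_span_end_py find_span_end_py find_span_end_py_alt
  exact main_lemma content.toList (content.toList.length + 1) 0 1 (by omega) (by omega) (by omega)
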